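-- pv_equiv track=rewrite | github.com/benquick123/code-profiling | code/batch-2/vse-naloge-brez-testov/DN6-Z-150.py | se_poznata
-- ===== SOURCE A (Python) =====
-- def avtor(tvit):
--     return tvit.split(":")[0]
--
-- def izloci_besedo(beseda):
--     while beseda and not beseda[0].isalnum():
--         beseda = beseda[1:]
--     while beseda and not beseda[-1].isalnum():
--         beseda = beseda[:-1]
--     return beseda
--
-- def se_zacne_z(tvit, c):
--     besede = []
--     for beseda in tvit.split():
--         if beseda[0] == c:
--             besede.append(izloci_besedo(beseda))
--     return besede
--
-- def se_poznata(tviti, oseba1, oseba2):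
--     for tvit in tviti:
--         pisec = avtor(tvit)
--         omenjeni = se_zacne_z(tvit, "@")
--         if oseba1 == pisec and oseba2 in omenjeni or \
--                 oseba2 == pisec and oseba1 in omenjeni:
--             return True
--     return False
-- ===== SOURCE B (Python) =====
-- def avtor(tvit):
--     return tvit.split(":")[0]
--
-- def izloci_besedo(beseda):
--     while beseda and not beseda[0].isalnum():
--         beseda = beseda[1:]
--     while beseda and not beseda[-1].isalnum():
--         beseda = beseda[:-1]
--     return beseda
--
-- def se_zacne_z(tvit, c):
--     besede = []
--     for beseda in tvit.split():
--         if beseda[0] == c: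
--             besede.append(izloci_besedo(beseda))
--     return besede
--
-- def se_poznata(tviti, oseba1, oseba2):
--     # Pass 1: index every author's mentions into one dict of sets.
--     omembe = {}
--     for tvit in tviti:
--         omembe.setdefault(avtor(tvit), set()).update(se_zacne_z(tvit, "@"))
--     # Pass 2: two constant-time lookups.
--     prazna = set()
--     return oseba2 in omembe.get(oseba1, prazna) or oseba1 in omembe.get(oseba2, prazna)
-- ===== Notes on version B (the rewrite author's own statement) =====
-- stated objective: alternative
-- what changed: B replaces A's per-tweet early-return scan with two passes: it first builds a dict mapping each author to the set of all their @-mentions, then answers with two dict lookups; order of tweets no longer matters.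
import Mathlib
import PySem

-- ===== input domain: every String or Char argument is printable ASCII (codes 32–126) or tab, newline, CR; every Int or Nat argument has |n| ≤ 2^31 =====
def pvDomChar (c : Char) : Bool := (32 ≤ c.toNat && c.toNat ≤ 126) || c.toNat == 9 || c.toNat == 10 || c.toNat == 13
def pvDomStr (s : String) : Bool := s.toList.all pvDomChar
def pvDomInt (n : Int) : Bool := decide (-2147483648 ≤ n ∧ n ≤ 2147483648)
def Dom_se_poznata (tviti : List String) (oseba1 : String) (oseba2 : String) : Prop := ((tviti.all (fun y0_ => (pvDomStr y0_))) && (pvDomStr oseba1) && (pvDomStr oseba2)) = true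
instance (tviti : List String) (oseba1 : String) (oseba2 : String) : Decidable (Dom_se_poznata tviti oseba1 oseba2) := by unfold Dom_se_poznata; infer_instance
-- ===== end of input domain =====

-- B replaces A's per-tweet early-return scan with an author→mentions index built in one pass,
-- answered by two dict lookups (objective: alternative decomposition, same cost).

-- ===== PORT A =====
-- tvit.split(":")[0]; the separator is nonempty so split? is always some, and the
-- resulting list is always nonempty, so the getD/headD defaults are never used
def avtor (tvit : String) : String :=
  ((PySem.Str.split? tvit ":").getD []).headD ""

-- the first while loop: drop leading chars while the head is not alnum
def pvStripL : List Char → List Char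
  | [] => []
  | c :: rest => if PySem.Chars.isalnum c then c :: rest else pvStripL rest

-- the second while loop (beseda[:-1]) rendered via reverse: drop trailing non-alnum chars
def izloci_besedo (beseda : String) : String :=
  String.ofList ((pvStripL (pvStripL beseda.toList).reverse).reverse)

-- beseda[0]: words from split() are nonempty, so headD's default ' ' is never compared
def se_zacne_z (tvit : String) (c : Char) : List String :=
  (PySem.Str.split₀ tvit).foldl
    (fun besede beseda =>
      if beseda.toList.headD ' ' = c then besede ++ [izloci_besedo beseda] else besede) []

def se_poznata (tviti : List String) (oseba1 : String) (oseba2 : String) : Bool :=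
  match tviti with
  | [] => false
  | tvit :: rest =>
    let pisec := avtor tvit
    let omenjeni := se_zacne_z tvit '@'
    if (oseba1 == pisec && omenjeni.contains oseba2) ||
       (oseba2 == pisec && omenjeni.contains oseba1) then true
    else se_poznata rest oseba1 oseba2

-- ===== PORT B =====
-- pass 1: omembe.setdefault(avtor(tvit), set()).update(se_zacne_z(tvit, "@"))
def pvOmembe (tviti : List String) : PySem.Dict String (PySem.Set String) :=
  tviti.foldl
    (fun d tvit =>
      d.modify (avtor tvit) PySem.Set.empty
        (fun s => PySem.Set.update s (se_zacne_z tvit '@')))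
    PySem.Dict.empty

def se_poznata_alt (tviti : List String) (oseba1 : String) (oseba2 : String) : Bool :=
  let omembe := pvOmembe tviti
  -- pass 2: two lookups
  PySem.Set.contains (omembe.getD oseba1 PySem.Set.empty) oseba2 ||
  PySem.Set.contains (omembe.getD oseba2 PySem.Set.empty) oseba1

-- ===== PRECONDITION & SPEC =====
def Spec_se_poznata (tviti : List String) (oseba1 : String) (oseba2 : String) (out : Bool) : Prop := out = se_poznata_alt tviti oseba1 oseba2
instance (tviti : List String) (oseba1 : String) (oseba2 : String) (out : Bool) : Decidable (Spec_se_poznata tviti oseba1 oseba2 out) := by unfold Spec_se_poznata; infer_instance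

-- ===== CLAIM (what is proved, stated in full; the proofs are below) =====
def Claim_equal_se_poznata : Prop := ∀ (tviti : List String) (oseba1 : String) (oseba2 : String), Dom_se_poznata tviti oseba1 oseba2 → Spec_se_poznata tviti oseba1 oseba2 (se_poznata tviti oseba1 oseba2)

-- ===== LEMMAS AND PROOFS =====

theorem pvContains_update (s : PySem.Set String) (l : List String) (p : String) :
    PySem.Set.contains (PySem.Set.update s l) p = (PySem.Set.contains s p || l.contains p) := by
  rw [Bool.eq_iff_iff]
  simp only [Bool.or_eq_true, PySem.Set.contains_iff, PySem.Set.mem_update,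
    List.contains_iff_mem]

-- p is in the built index's entry for k iff it was there in d or some tweet has author k and mentions p
theorem pvOmembe_getD_contains (tviti : List String) (d : PySem.Dict String (PySem.Set String))
    (k p : String) :
    PySem.Set.contains
      ((tviti.foldl
        (fun d tvit =>
          d.modify (avtor tvit) PySem.Set.empty
            (fun s => PySem.Set.update s (se_zacne_z tvit '@'))) d).getD k PySem.Set.empty) p
    = (PySem.Set.contains (d.getD k PySem.Set.empty) p ||
       tviti.any (fun t => avtor t == k && (se_zacne_z t '@').contains p)) := by
  induction tviti generalizing d with
  | nil => simp
  | cons t rest ih =>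
    simp only [List.foldl_cons, List.any_cons, ih]
    rw [PySem.Dict.getD_modify]
    by_cases h : k = avtor t
    · subst h
      rw [if_pos rfl, pvContains_update]
      simp only [beq_self_eq_true, Bool.true_and, Bool.or_assoc]
    · rw [if_neg h]
      have hb : (avtor t == k) = false := beq_eq_false_iff_ne.mpr (fun e => h e.symm)
      simp only [hb, Bool.false_and, Bool.false_or]

-- A is the 'any' of its per-tweet predicate
theorem se_poznata_eq_any (tviti : List String) (o1 o2 : String) :
    se_poznata tviti o1 o2
    = tviti.any (fun t =>
        (o1 == avtor t && (se_zacne_z t '@').contains o2) ||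
        (o2 == avtor t && (se_zacne_z t '@').contains o1)) := by
  induction tviti with
  | nil => simp [se_poznata]
  | cons t rest ih =>
    simp only [se_poznata, List.any_cons, ← ih]
    split_ifs with h
    · simp only [h, Bool.true_or]
    · rw [Bool.not_eq_true] at h
      rw [h, Bool.false_or]

theorem pvAny_or (l : List String) (f g : String → Bool) :
    l.any (fun t => f t || g t) = (l.any f || l.any g) := by
  induction l with
  | nil => rfl
  | cons t rest ih =>
    simp only [List.any_cons, ih]
    cases f t <;> cases g t <;> simp

theorem pvBeq_comm (a b : String) : (a == b) = (b == a) := by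
  by_cases h : a = b
  · rw [h]
  · rw [beq_eq_false_iff_ne.mpr h, beq_eq_false_iff_ne.mpr (fun e => h e.symm)]

theorem pvAny_swap (l : List String) (o : String) (g : String → Bool) :
    l.any (fun t => avtor t == o && g t) = l.any (fun t => o == avtor t && g t) := by
  induction l with
  | nil => rfl
  | cons t rest ih => simp only [List.any_cons, pvBeq_comm]

theorem se_poznata_spec_aux (tviti : List String) (o1 o2 : String) :
    se_poznata tviti o1 o2 = se_poznata_alt tviti o1 o2 := by
  have hB : se_poznata_alt tviti o1 o2 =
      (PySem.Set.contains ((pvOmembe tviti).getD o1 PySem.Set.empty) o2 ||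
       PySem.Set.contains ((pvOmembe tviti).getD o2 PySem.Set.empty) o1) := rfl
  rw [hB]
  unfold pvOmembe
  rw [pvOmembe_getD_contains, pvOmembe_getD_contains, se_poznata_eq_any, pvAny_or]
  simp only [PySem.Dict.getD_empty]
  have hE : ∀ q : String, PySem.Set.contains PySem.Set.empty q = false := fun _ => rfl
  rw [hE, hE, Bool.false_or, Bool.false_or]
  rw [pvAny_swap, pvAny_swap]

-- ===== VERDICT (by name: the statement is the Claim_ definition above) =====
theorem se_poznata_spec : Claim_equal_se_poznata := by
  intro tviti o1 o2 _
  exact se_poznata_spec_aux tviti o1 o2
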